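-- pv_equiv track=rewrite | github.com/HanbumKo/AmazingAmase | VoronoiForInitialSearch.py | sortaraesize
-- ===== SOURCE A (Python) =====
-- def sortaraesize(arealist):
--     sortedarealist_idx = [0 for _ in range(len(arealist))]
--     sortedarealist = arealist[:]
--     sortedarealist.sort()
--     for i in range(len(sortedarealist)):
--         for j in range(len(arealist)):
--             if sortedarealist[i] == arealist[j]:
--                 sortedarealist_idx[i] = j
--     return sortedarealist_idx
-- ===== SOURCE B (Python) =====
-- def sortaraesize(arealist):
--     # Sort (index, value) pairs by (value, -index): within a run of equal values the
--     # run's first pair carries the LAST original index, which A's rescan also keeps.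
--     pairs = sorted(enumerate(arealist), key=lambda p: (p[1], -p[0]))
--     res = []
--     cur = 0
--     prev = None
--     for i, v in pairs:
--         if v != prev:
--             cur = i
--             prev = v
--         res.append(cur)
--     return res
-- ===== Notes on version B (the rewrite author's own statement) =====
-- stated objective: faster
-- what changed: Replaces the quadratic nested rescan by sorting the (index,value) pairs on the composite key (value,-index) and a single linear run-sweep that propagates each run's first index (which is the value's last original index), with no per-element search and no dictionary.
import Mathlib
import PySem

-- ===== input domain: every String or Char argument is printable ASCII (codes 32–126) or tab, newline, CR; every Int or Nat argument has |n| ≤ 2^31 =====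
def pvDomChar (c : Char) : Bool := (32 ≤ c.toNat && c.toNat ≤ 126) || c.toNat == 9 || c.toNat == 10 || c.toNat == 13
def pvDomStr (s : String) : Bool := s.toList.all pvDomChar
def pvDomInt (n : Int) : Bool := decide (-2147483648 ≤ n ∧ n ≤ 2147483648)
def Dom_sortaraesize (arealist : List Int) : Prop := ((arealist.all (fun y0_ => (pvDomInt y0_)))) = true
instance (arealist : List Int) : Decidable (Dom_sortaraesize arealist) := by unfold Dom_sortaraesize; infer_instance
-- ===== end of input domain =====

-- B replaces A's quadratic nested rescan by sorting (index,value) pairs on the key (value,-index)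
-- and one linear run-sweep propagating each run's first index; equivalence proved on all inputs.

-- ===== PORT A =====
def sortaraesize (arealist : List Int) : List Int :=
  let sortedarealist_idx := (PySem.List.pyRange 0 arealist.length 1).map (fun _ => (0 : Int))
  let sortedarealist := PySem.List.sorted (PySem.List.slice arealist none none) (fun x => x) false
  (PySem.List.pyRange 0 sortedarealist.length 1).foldl (fun idx i =>
    (PySem.List.pyRange 0 arealist.length 1).foldl (fun idx j =>
      if PySem.List.pyGetD sortedarealist i 0 == PySem.List.pyGetD arealist j 0
      then PySem.List.pySetD idx i j else idx) idx) sortedarealist_idx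

-- ===== PORT B =====
-- Source B: pairs = sorted(enumerate(arealist), key=lambda p: (p[1], -p[0])); then one pass
-- carrying (res, cur, prev), appending cur after refreshing it at each run head.
def sortaraesize_alt (arealist : List Int) : List Int :=
  let pairs := PySem.List.sorted2 (PySem.List.enumerate arealist 0)
    (fun p => p.2) (fun p => -p.1) false
  (pairs.foldl (fun (st : List Int × Int × Option Int) p =>
      if (some p.2) ≠ st.2.2 then (st.1 ++ [p.1], p.1, some p.2)
      else (st.1 ++ [st.2.1], st.2.1, st.2.2))
    ([], 0, none)).1

-- ===== PRECONDITION & SPEC =====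
def Spec_sortaraesize (arealist : List Int) (out : List Int) : Prop := out = sortaraesize_alt arealist
instance (arealist : List Int) (out : List Int) : Decidable (Spec_sortaraesize arealist out) := by unfold Spec_sortaraesize; infer_instance

-- ===== CLAIM (what is proved, stated in full; the proofs are below) =====
def Claim_equal_sortaraesize : Prop := ∀ (arealist : List Int), Dom_sortaraesize arealist → Spec_sortaraesize arealist (sortaraesize arealist)

-- ===== LEMMAS AND PROOFS =====

-- position (counted from offset s) of the LAST occurrence of v in xs, none if absent
def lastPos (v : Int) (xs : List Int) (s : Int) : Option Int :=
  match xs with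
  | [] => none
  | x :: t =>
    match lastPos v t (s + 1) with
    | some r => some r
    | none => if v == x then some s else none

-- the last-occurrence index of v in arealist (0 when absent; only used on present values)
def hIdx (arealist : List Int) (v : Int) : Int := (lastPos v arealist 0).getD 0

-- strict order in which B's sorted pairs appear: by value, ties by DESCENDING index
def runRel (p q : Int × Int) : Prop := p.2 < q.2 ∨ (p.2 = q.2 ∧ q.1 < p.1)

-- every run head of the pair list carries index h(value)
def RunHeads (h : Int → Int) : Option Int → List (Int × Int) → Prop
  | _, [] => True
  | prev, p :: t => (some p.2 = prev ∨ p.1 = h p.2) ∧ RunHeads h (some p.2) t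

theorem lastPos_mem (v : Int) : ∀ (xs : List Int) (s r : Int),
    lastPos v xs s = some r → (r, v) ∈ PySem.List.enumerate xs s ∧ s ≤ r := by
  intro xs
  induction xs with
  | nil => intro s r h; simp [lastPos] at h
  | cons x t ih =>
    intro s r h
    rw [PySem.List.enumerate_cons]
    unfold lastPos at h
    cases ht : lastPos v t (s + 1) with
    | some r' =>
      rw [ht] at h
      have hrr : r' = r := Option.some.inj h
      obtain ⟨hm, hs⟩ := ih (s + 1) r' ht
      subst hrr
      exact ⟨List.mem_cons_of_mem _ hm, by omega⟩
    | none =>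
      rw [ht] at h
      by_cases hv : v = x
      · subst hv
        rw [if_pos (by simp)] at h
        have hsr : s = r := Option.some.inj h
        subst hsr
        exact ⟨by simp, le_refl _⟩
      · rw [if_neg (by simpa using hv)] at h
        exact absurd h (by simp)

theorem lastPos_ge : ∀ (xs : List Int) (s : Int) (p : Int × Int),
    p ∈ PySem.List.enumerate xs s → ∃ j, lastPos p.2 xs s = some j ∧ p.1 ≤ j := by
  intro xs
  induction xs with
  | nil => intro s p h; simp [PySem.List.enumerate_nil] at h
  | cons x t ih =>
    intro s p h
    obtain ⟨i, v⟩ := p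
    rw [PySem.List.enumerate_cons, List.mem_cons] at h
    rcases h with h | h
    · injection h with h1 h2
      subst h1; subst h2
      cases ht : lastPos v t (i + 1) with
      | some r =>
        refine ⟨r, by unfold lastPos; rw [ht], ?_⟩
        have := (lastPos_mem v t (i + 1) r ht).2
        omega
      | none =>
        exact ⟨i, by unfold lastPos; rw [ht]; simp, le_refl _⟩
    · obtain ⟨j, hj, hij⟩ := ih (s + 1) (i, v) h
      exact ⟨j, by unfold lastPos; rw [hj], hij⟩

-- sorted2 with Int components IS sorted with the lexicographic key
theorem sorted2_eq_sorted_lex {α : Type} (xs : List α) (k1 k2 : α → Int) :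
    PySem.List.sorted2 xs k1 k2 false
      = PySem.List.sorted xs (fun x => toLex (k1 x, k2 x)) false := by
  rw [PySem.List.sorted_eq_foldl_insertBy]
  show List.foldl (fun acc x => PySem.List.insertBy
      (fun a b => decide (k1 a < k1 b) || (!decide (k1 b < k1 a) && decide (k2 a < k2 b))) x acc) [] xs = _
  have hbefore : (fun a b => decide (k1 a < k1 b) || (!decide (k1 b < k1 a) && decide (k2 a < k2 b)))
      = (fun a b => decide ((toLex (k1 a, k2 a) : Lex (Int × Int)) < toLex (k1 b, k2 b))) := by
    funext a b
    by_cases h1 : k1 a < k1 b <;> by_cases h2 : k1 b < k1 a <;> by_cases h3 : k2 a < k2 b <;>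
      simp [h1, h2, h3, Prod.Lex.lt_iff, ofLex_toLex] <;> omega
  rw [hbefore]

-- B's sorted pair list is pairwise runRel (strictly increasing lexicographic key)
theorem pairs_pairwise (arealist : List Int) :
    (PySem.List.sorted2 (PySem.List.enumerate arealist 0)
      (fun p => p.2) (fun p => -p.1) false).Pairwise runRel := by
  rw [sorted2_eq_sorted_lex]
  set e := PySem.List.enumerate arealist 0 with he
  set key : Int × Int → Lex (Int × Int) := fun p => toLex (p.2, -p.1) with hkey
  have hle : (PySem.List.sorted e key false).Pairwise (fun a b => key a ≤ key b) :=
    PySem.List.sorted_pairwise e key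
  have hnd : (PySem.List.sorted e key false).Nodup := by
    refine (PySem.List.sorted_perm e key false).nodup_iff.mpr ?_
    have := PySem.List.pairwise_lt_enumerate arealist (0 : Int)
    exact List.Pairwise.imp (fun h => by
      intro hEq; rw [hEq] at h; exact lt_irrefl _ h) this
  refine List.Pairwise.imp ?_ (hle.and hnd)
  rintro a b ⟨hab, hne⟩
  have hlt : key a < key b := by
    rcases lt_or_eq_of_le hab with h | h
    · exact h
    · exfalso
      apply hne
      have hpq : (a.2, -a.1) = (b.2, -b.1) := by
        have := congrArg ofLex h
        simpa [hkey, ofLex_toLex] using this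
      injection hpq with hv hi
      exact Prod.ext (by omega) hv
  rw [hkey] at hlt
  have hiff := Prod.Lex.lt_iff.mp hlt
  simp only [ofLex_toLex] at hiff
  rcases hiff with h | ⟨h1, h2⟩
  · exact Or.inl h
  · exact Or.inr ⟨h1, by omega⟩

-- every run head of a runRel-pairwise list closed under "last index" carries index h(value)
theorem runHeads_build (h : Int → Int) :
    ∀ (suf pre : List (Int × Int)),
    (pre ++ suf).Pairwise runRel →
    (∀ p ∈ pre ++ suf, (h p.2, p.2) ∈ pre ++ suf ∧ p.1 ≤ h p.2) →
    RunHeads h ((pre.getLast?).map (·.2)) suf := by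
  intro suf
  induction suf with
  | nil => intro pre _ _; trivial
  | cons p t ih =>
    intro pre hpw hcl
    constructor
    · by_cases hp : some p.2 = (pre.getLast?).map (·.2)
      · exact Or.inl hp
      · right
        obtain ⟨hmem, hle⟩ := hcl p (by simp)
        rcases List.mem_append.mp hmem with hpre | hsuf
        · -- impossible: the value p.2 already occurred, so the last consumed value is p.2
          exfalso
          have hpre_ne : pre ≠ [] := by rintro rfl; simp at hpre
          set q := pre.getLast hpre_ne with hq
          have hqmem : q ∈ pre := List.getLast_mem hpre_ne
          have hsplit : pre.dropLast ++ [q] = pre := List.dropLast_append_getLast hpre_ne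
          have hqp : runRel q p := ((List.pairwise_append.mp hpw).2.2) q hqmem p (by simp)
          have hq2 : some p.2 ≠ some q.2 := by
            intro hc; apply hp
            rw [List.getLast?_eq_some_getLast hpre_ne]
            simpa using hc
          have hqlt : q.2 < p.2 := by
            rcases hqp with h1 | ⟨h1, _⟩
            · exact h1
            · exact absurd (congrArg some h1.symm) hq2
          rw [← hsplit] at hpre
          rcases List.mem_append.mp hpre with hdl | hone
          · have hpwpre : pre.Pairwise runRel := (List.pairwise_append.mp hpw).1
            rw [← hsplit] at hpwpre
            have hrq : runRel (h p.2, p.2) q :=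
              ((List.pairwise_append.mp hpwpre).2.2) _ hdl q (by simp)
            rcases hrq with h1 | ⟨h1, _⟩
            · simp only at h1; omega
            · simp only at h1; omega
          · have hqq : (h p.2, p.2) = q := by simpa using hone
            have : p.2 = q.2 := by rw [← hqq]
            omega
        · rcases List.mem_cons.mp hsuf with heq | ht
          · exact (congrArg Prod.fst heq).symm
          · exfalso
            have hpt : (p :: t).Pairwise runRel := (List.pairwise_append.mp hpw).2.1
            have hrr : runRel p (h p.2, p.2) := (List.pairwise_cons.mp hpt).1 _ ht
            rcases hrr with h1 | ⟨_, h2⟩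
            · simp only at h1; omega
            · simp only at h2; omega
    · have hpre' : ((pre ++ [p]).getLast?).map (·.2) = some p.2 := by
        rw [List.getLast?_concat]
        rfl
      have := ih (pre ++ [p])
        (by simpa [List.append_assoc] using hpw)
        (by intro q hq; simpa [List.append_assoc] using hcl q (by simpa [List.append_assoc] using hq))
      rwa [hpre'] at this

-- the run sweep outputs h(value) for every pair
theorem scan_eq (h : Int → Int) :
    ∀ (ps : List (Int × Int)) (prev : Option Int) (cur : Int) (acc : List Int),
    RunHeads h prev ps → (∀ w, prev = some w → cur = h w) →
    (ps.foldl (fun (st : List Int × Int × Option Int) p =>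
        if (some p.2) ≠ st.2.2 then (st.1 ++ [p.1], p.1, some p.2)
        else (st.1 ++ [st.2.1], st.2.1, st.2.2)) (acc, cur, prev)).1
      = acc ++ ps.map (fun p => h p.2) := by
  intro ps
  induction ps with
  | nil => intro prev cur acc _ _; simp
  | cons p t ih =>
    intro prev cur acc hr hcur
    obtain ⟨hhead, htail⟩ := hr
    simp only [List.foldl_cons, List.map_cons]
    by_cases hc : (some p.2 : Option Int) = prev
    · rw [if_neg (by simpa using hc)]
      have hcv : cur = h p.2 := hcur p.2 hc.symm
      have := ih prev cur (acc ++ [cur]) (hc ▸ htail) hcur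
      rw [this, hcv]
      simp
    · rw [if_pos (by simpa using hc)]
      have hpv : p.1 = h p.2 := by
        rcases hhead with h1 | h1
        · exact absurd h1 hc
        · exact h1
      have := ih (some p.2) p.1 (acc ++ [p.1]) htail (by rintro w hw; injection hw with hw'; rw [← hw']; exact hpv)
      rw [this, hpv]
      simp

-- ===== A-side lemmas (A's nested loops compute h(value) over the sorted copy) =====

-- A's inner scan, as a scalar fold over the enumerated list, computes the last position
theorem enumFold_eq_lastPos (v : Int) (xs : List Int) : ∀ (s a : Int),
    (PySem.List.enumerate xs s).foldl (fun acc (p : Int × Int) => if v == p.2 then p.1 else acc) a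
      = (lastPos v xs s).getD a := by
  induction xs with
  | nil => intro s a; simp [PySem.List.enumerate_nil, lastPos]
  | cons x t ih =>
    intro s a
    rw [PySem.List.enumerate_cons]
    simp only [List.foldl_cons]
    rw [ih]
    cases h : lastPos v t (s + 1) with
    | some r => simp [lastPos, h]
    | none =>
      by_cases hv : v = x
      · subst hv; simp [lastPos, h]
      · simp [lastPos, h, hv]

-- a fold over range(len(xs)) whose body uses both the index and xs[index] is a fold over enumerate(xs)
theorem rangeFold_eq_enumFold {β : Type} (f : β → Int → Int → β) (d0 : Int) :
    ∀ (xs pre : List Int) (a : β),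
    (PySem.List.pyRange pre.length (pre ++ xs).length 1).foldl
        (fun acc j => f acc j (PySem.List.pyGetD (pre ++ xs) j d0)) a
      = (PySem.List.enumerate xs pre.length).foldl (fun acc (p : Int × Int) => f acc p.1 p.2) a := by
  intro xs
  induction xs with
  | nil => intro pre a; simp [PySem.List.enumerate_nil, PySem.List.pyRange_one_eq_nil]
  | cons x t ih =>
    intro pre a
    rw [PySem.List.enumerate_cons]
    have hlt : (pre.length : Int) < ((pre ++ x :: t).length : Int) := by simp
    rw [PySem.List.pyRange_one_cons hlt]
    simp only [List.foldl_cons]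
    have hget : PySem.List.pyGetD (pre ++ x :: t) (pre.length : Int) d0 = x := by
      rw [PySem.List.pyGetD_natCast]
      simp [List.getD_eq_getElem?_getD]
    rw [hget]
    have := ih (pre ++ [x]) (f a (pre.length : Int) x)
    simpa [List.append_assoc] using this

-- A's inner loop (conditional pySetD at fixed position i) is a single set of the scalar fold
theorem foldl_pySetD_eq_set (c : Int → Bool) : ∀ (rng idx : List Int) (i : Int)
    (hi0 : 0 ≤ i) (hi : i.toNat < idx.length) (hrng : ∀ j ∈ rng, 0 ≤ j),
    rng.foldl (fun id j => if c j then PySem.List.pySetD id i j else id) idx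
      = idx.set i.toNat (rng.foldl (fun a j => if c j then j else a) idx[i.toNat]) := by
  intro rng
  induction rng with
  | nil => intro idx i _ hi _; simp [List.set_getElem_self]
  | cons j t ih =>
    intro idx i hi0 hi hrng
    simp only [List.foldl_cons]
    by_cases hc : c j
    · simp only [hc, if_true]
      rw [PySem.List.pySetD_of_nonneg _ _ hi0]
      rw [ih (idx.set i.toNat j) i hi0 (by simpa using hi) (fun j' hj' => hrng j' (List.mem_cons_of_mem _ hj'))]
      rw [List.getElem_set_self, List.set_set]
    · simp only [hc]
      exact ih idx i hi0 hi (fun j' hj' => hrng j' (List.mem_cons_of_mem _ hj'))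

-- A's outer loop: folding the per-position updates over range(m) rewrites the first m slots
theorem outer_fold_eq_map (s xs : List Int) (G : Int → Int)
    (hG : ∀ i : Int, G i = (PySem.List.pyRange 0 (xs.length : Int) 1).foldl
        (fun a j => if PySem.List.pyGetD s i 0 == PySem.List.pyGetD xs j 0 then j else a) 0) :
    ∀ (m : Nat), m ≤ xs.length →
    (PySem.List.pyRange 0 (m : Int) 1).foldl (fun idx i =>
        (PySem.List.pyRange 0 (xs.length : Int) 1).foldl (fun idx j =>
          if PySem.List.pyGetD s i 0 == PySem.List.pyGetD xs j 0
          then PySem.List.pySetD idx i j else idx) idx)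
        ((PySem.List.pyRange 0 (xs.length : Int) 1).map (fun _ => (0 : Int)))
      = (PySem.List.pyRange 0 (m : Int) 1).map G
          ++ ((PySem.List.pyRange 0 (xs.length : Int) 1).map (fun _ => (0 : Int))).drop m := by
  intro m
  induction m with
  | zero => intro _; simp [PySem.List.pyRange_one_eq_nil]
  | succ m ih =>
    intro hm
    have hm' : m ≤ xs.length := Nat.le_of_succ_le hm
    have hsucc : ((m + 1 : Nat) : Int) = (m : Int) + 1 := by push_cast; ring
    rw [hsucc, PySem.List.pyRange_one_succ_right (by positivity), List.foldl_append, List.map_append, ih hm']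
    simp only [List.foldl_cons, List.foldl_nil, List.map_cons, List.map_nil]
    set zeros := (PySem.List.pyRange 0 (xs.length : Int) 1).map (fun _ => (0 : Int)) with hz
    have hzlen : zeros.length = xs.length := by
      simp [hz, PySem.List.length_pyRange_one]
    have hmlt : m < xs.length := hm
    have hleft : ((PySem.List.pyRange 0 (m : Int) 1).map G).length = m := by
      simp [PySem.List.length_pyRange_one]
    have hlen2 : ((m : Int)).toNat < ((PySem.List.pyRange 0 (m : Int) 1).map G ++ zeros.drop m).length := by
      simp only [List.length_append, hleft, List.length_drop, hzlen, Int.toNat_natCast]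
      omega
    rw [foldl_pySetD_eq_set _ _ _ _ (by positivity) hlen2
      (fun j hj => ((PySem.List.mem_pyRange_one).1 hj).1)]
    simp only [Int.toNat_natCast] at hlen2 ⊢
    have hdrop : zeros.drop m = zeros[m]'(by omega) :: zeros.drop (m + 1) :=
      List.drop_eq_getElem_cons (by omega)
    have hzm : zeros[m]'(by omega) = (0 : Int) := by
      simp [hz]
    have hgetm : ((PySem.List.pyRange 0 (m : Int) 1).map G ++ zeros.drop m)[m]'hlen2 = (0 : Int) := by
      rw [List.getElem_append_right (by omega)]
      simp [hleft, hdrop, hzm]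
    rw [hgetm]
    rw [show ((PySem.List.pyRange 0 (m : Int) 1).map G ++ zeros.drop m).set m
          ((PySem.List.pyRange 0 (xs.length : Int) 1).foldl
            (fun a j => if PySem.List.pyGetD s (m : Int) 0 == PySem.List.pyGetD xs j 0 then j else a) 0)
        = (PySem.List.pyRange 0 (m : Int) 1).map G
            ++ (zeros.drop m).set 0
              ((PySem.List.pyRange 0 (xs.length : Int) 1).foldl
                (fun a j => if PySem.List.pyGetD s (m : Int) 0 == PySem.List.pyGetD xs j 0 then j else a) 0)
        from by rw [List.set_append_right _ _ (by omega)]; simp [hleft]]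
    rw [hdrop, ← hG]
    simp
    rw [hdrop, List.set_cons_zero]

-- A's result is h(value) mapped over the sorted copy
theorem A_eq_map (arealist : List Int) :
    sortaraesize arealist
      = (PySem.List.sorted arealist (fun x => x) false).map (hIdx arealist) := by
  unfold sortaraesize
  simp only [PySem.List.slice_none_none]
  set s := PySem.List.sorted arealist (fun x => x) false with hs
  have hlen : s.length = arealist.length := PySem.List.length_sorted _ _ _
  rw [hlen]
  rw [outer_fold_eq_map s arealist
      (fun i => (PySem.List.pyRange 0 (arealist.length : Int) 1).foldl
        (fun a j => if PySem.List.pyGetD s i 0 == PySem.List.pyGetD arealist j 0 then j else a) 0)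
      (fun i => rfl) arealist.length le_rfl]
  have hdrop : ((PySem.List.pyRange 0 (arealist.length : Int) 1).map (fun _ => (0 : Int))).drop arealist.length = [] := by
    apply List.drop_eq_nil_of_le
    simp [PySem.List.length_pyRange_one]
  rw [hdrop, List.append_nil]
  have hGi : ∀ i : Int,
      (PySem.List.pyRange 0 (arealist.length : Int) 1).foldl
        (fun a j => if PySem.List.pyGetD s i 0 == PySem.List.pyGetD arealist j 0 then j else a) 0
      = hIdx arealist (PySem.List.pyGetD s i 0) := by
    intro i
    have := rangeFold_eq_enumFold
      (fun (acc j x : Int) => if PySem.List.pyGetD s i 0 == x then j else acc) 0 arealist [] 0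
    simp only [List.nil_append, List.length_nil, Nat.cast_zero] at this
    refine this.trans ?_
    rw [enumFold_eq_lastPos]
    rfl
  simp only [hGi]
  rw [show (fun i => hIdx arealist (PySem.List.pyGetD s i 0))
        = (hIdx arealist) ∘ (fun i => PySem.List.pyGetD s i 0) from rfl]
  rw [← hlen, ← List.map_map, PySem.List.map_pyGetD_pyRange_zero']

-- ===== VERDICT (by name: the statement is the Claim_ definition above) =====
theorem sortaraesize_spec : Claim_equal_sortaraesize := by
  intro arealist _
  unfold Spec_sortaraesize
  rw [A_eq_map]
  unfold sortaraesize_alt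
  set e := PySem.List.enumerate arealist 0 with he
  set ps := PySem.List.sorted2 e (fun p => p.2) (fun p => -p.1) false with hps
  have hperm : ps.Perm e := PySem.List.sorted2_perm _ _ _ _
  have hcl : ∀ p ∈ ps, (hIdx arealist p.2, p.2) ∈ ps ∧ p.1 ≤ hIdx arealist p.2 := by
    intro p hp
    have hpe : p ∈ e := hperm.mem_iff.mp hp
    obtain ⟨j, hj, hij⟩ := lastPos_ge arealist 0 p (by rw [he] at hpe; exact hpe)
    have hji : hIdx arealist p.2 = j := by simp [hIdx, hj]
    refine ⟨?_, by omega⟩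
    rw [hji]
    exact hperm.mem_iff.mpr (by rw [he]; exact (lastPos_mem p.2 arealist 0 j hj).1)
  have hpw : ps.Pairwise runRel := pairs_pairwise arealist
  have hrh : RunHeads (hIdx arealist) none ps := by
    have := runHeads_build (hIdx arealist) ps []
      (by simpa using hpw) (by simpa using hcl)
    simpa using this
  rw [scan_eq (hIdx arealist) ps none 0 [] hrh (by intro w h; cases h)]
  rw [List.nil_append]
  symm
  have hmapsnd : ps.map (fun p => p.2) = PySem.List.sorted arealist (fun x => x) false := by
    refine (PySem.List.sorted_id_eq_of_perm_of_pairwise arealist (ps.map (fun p => p.2)) ?_ ?_).symm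
    · have hpm : (ps.map (fun p => p.2)).Perm (e.map (fun p => p.2)) := hperm.map _
      rwa [he, PySem.List.map_snd_enumerate] at hpm
    · refine List.pairwise_map.mpr (List.Pairwise.imp ?_ hpw)
      intro a b hab
      rcases hab with h | ⟨h, _⟩ <;> omega
  calc ps.map (fun p => hIdx arealist p.2)
      = (ps.map (fun p => p.2)).map (hIdx arealist) := by rw [List.map_map]; rfl
    _ = (PySem.List.sorted arealist (fun x => x) false).map (hIdx arealist) := by rw [hmapsnd]
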